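-- pv_equiv track=rewrite | github.com/nloyfer/wgbs_tools | src/python/pat_vis.py | table2text
-- ===== SOURCE A (Python) =====
-- BORDER = '|'
--
-- def table2text(table):
--     """ join table to text.
--         add strikethrough to borders if they cross a read """
--     lines = []
--     for line in table:
--         nline = ''
--         for i, ch in enumerate(line):
--             nline += ch
--             # add strikethrough to the borders
--             if (len(line) - 1 > i > 0) and (ch == BORDER) \
--                 and (set((line[i - 1], line[i + 1])) <= set('CT.')):
--                 nline += '\u0336'
--         lines.append(nline)
--     return '\n'.join(lines)
-- ===== SOURCE B (Python) =====
-- BORDER = '|'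
--
-- def table2text(table):
--     """ join table to text.
--         add strikethrough to borders if they cross a read """
--     text = '\n'.join(table)
--     out = []
--     prev = '\n'
--     for ch, nxt in zip(text, text[1:] + '\n'):
--         out.append(ch)
--         if ch == BORDER and prev in 'CT.' and nxt in 'CT.':
--             out.append('\u0336')
--         prev = ch
--     return ''.join(out)
-- ===== Notes on version B (the rewrite author's own statement) =====
-- stated objective: simpler
-- what changed: Instead of a nested per-line loop with index arithmetic and a set-subset test on line[i-1]/line[i+1], B joins the table into one text first and marks borders in a single left-to-right pass that carries the previous character and peeks one ahead; the newline separator is never in 'CT.', so A's 0<i<len-1 guards are reproduced without any indexing.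
import Mathlib
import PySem

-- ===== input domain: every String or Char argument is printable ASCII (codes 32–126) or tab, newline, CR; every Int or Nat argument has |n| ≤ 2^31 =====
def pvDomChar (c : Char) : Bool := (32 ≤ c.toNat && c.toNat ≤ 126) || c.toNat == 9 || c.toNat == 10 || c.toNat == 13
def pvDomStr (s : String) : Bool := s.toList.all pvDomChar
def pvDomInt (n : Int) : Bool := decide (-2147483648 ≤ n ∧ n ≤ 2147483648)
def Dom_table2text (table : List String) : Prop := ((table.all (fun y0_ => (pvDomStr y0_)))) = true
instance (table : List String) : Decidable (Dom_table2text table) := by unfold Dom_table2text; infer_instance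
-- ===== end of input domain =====

-- B joins the table once and marks borders in a single left-to-right pass carrying the
-- previous character (a newline neighbour is never in 'CT.', so A's per-line index guards
-- are reproduced for free); objective: simpler/idiomatic, no speed claim.

-- ===== PORT A =====
-- one step of A's inner loop over enumerate(line): append ch, then maybe the strikethrough
def pvStepA (cs : List Char) (nline : List Char) (p : Int × Char) : List Char :=
  let i := p.1
  let ch := p.2
  let nline := nline ++ [ch]
  if ((cs.length : Int) - 1 > i ∧ i > 0) ∧ ch = '|' ∧
      PySem.Set.issubset
        (PySem.Set.ofList [(PySem.List.pyGet? cs (i - 1)).getD ' ',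
                           (PySem.List.pyGet? cs (i + 1)).getD ' '])
        "CT.".toList = true
  then nline ++ ['\u0336'] else nline
  -- pyGet?.getD ' ': Python evaluates line[i-1]/line[i+1] only under the range guard,
  -- where both indices are in range, so the ' ' default is never the value used.

def pvLineA (cs : List Char) : List Char :=
  (PySem.List.enumerate cs 0).foldl (pvStepA cs) []

def table2text (table : List String) : String :=
  PySem.Str.join "\n" (table.map (fun line => String.ofList (pvLineA line.toList)))

-- ===== PORT B =====
-- one step of B's loop over zip(text, text[1:] + '\n'): state = (out, prev)
def pvStepB (st : List Char × Char) (p : Char × Char) : List Char × Char :=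
  let out := st.1 ++ [p.1]
  let out := if p.1 = '|' ∧ PySem.Chars.isIn [st.2] "CT.".toList = true ∧
                PySem.Chars.isIn [p.2] "CT.".toList = true
             then out ++ ['\u0336'] else out
  (out, p.1)

-- text = '\n'.join(table); written twice instead of a `let` binder, same value
def table2text_alt (table : List String) : String :=
  String.ofList
    (((PySem.Str.join "\n" table).toList.zip
        (PySem.List.slice (PySem.Str.join "\n" table).toList (some 1) none ++ ['\n'])).foldl
      pvStepB ([], '\n')).1

-- ===== PRECONDITION & SPEC =====
def Spec_table2text (table : List String) (out : String) : Prop := out = table2text_alt table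
instance (table : List String) (out : String) : Decidable (Spec_table2text table out) := by unfold Spec_table2text; infer_instance

-- ===== CLAIM (what is proved, stated in full; the proofs are below) =====
def Claim_equal_table2text : Prop := ∀ (table : List String), Dom_table2text table → Spec_table2text table (table2text table)

-- ===== LEMMAS AND PROOFS =====

-- common reference scan: previous character carried, one lookahead, '\n' as end sentinel
def pvScan (prev : Char) : List Char → List Char
  | [] => []
  | c :: rest =>
      (if c = '|' ∧ prev ∈ "CT.".toList ∧ rest.headD '\n' ∈ "CT.".toList
       then [c, '\u0336'] else [c]) ++ pvScan c rest

lemma pv_isIn_singleton (c : Char) (l : List Char) :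
    PySem.Chars.isIn [c] l = true ↔ c ∈ l := by
  rw [PySem.Chars.isIn_iff_infix]
  constructor
  · intro h; exact h.mem (by simp)
  · intro h
    obtain ⟨pre, suf, rfl⟩ := List.mem_iff_append.mp h
    exact ⟨pre, suf, by simp⟩

-- B's fold equals the reference scan
lemma pv_foldB (text : List Char) : ∀ (prev : Char) (acc : List Char),
    ((text.zip (text.drop 1 ++ ['\n'])).foldl pvStepB (acc, prev)).1
      = acc ++ pvScan prev text := by
  induction text with
  | nil => simp [pvScan]
  | cons c rest ih =>
    intro prev acc
    have hz : (c :: rest).zip ((c :: rest).drop 1 ++ ['\n'])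
        = (c, (rest ++ ['\n']).headD '\n') :: rest.zip (rest.drop 1 ++ ['\n']) := by
      cases rest <;> simp
    rw [hz]
    simp only [List.foldl_cons, pvStepB]
    rw [ih]
    have hh : (rest ++ ['\n']).headD '\n' = rest.headD '\n' := by cases rest <;> simp
    rw [hh]
    simp only [pvScan, pv_isIn_singleton]
    split <;> simp

-- A's fold over enumerate equals the reference scan (pre = characters already consumed)
lemma pv_foldA : ∀ (suf pre acc : List Char),
    (PySem.List.enumerate suf (pre.length : Int)).foldl (pvStepA (pre ++ suf)) acc
      = acc ++ pvScan (pre.getLastD '\n') suf := by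
  intro suf
  induction suf with
  | nil => intro pre acc; simp [PySem.List.enumerate_nil, pvScan]
  | cons c rest ih =>
    intro pre acc
    rw [PySem.List.enumerate_cons, List.foldl_cons]
    have hre : pre ++ c :: rest = (pre ++ [c]) ++ rest := by simp
    have hlen : ((pre.length : Int) + 1) = (((pre ++ [c]).length : Nat) : Int) := by
      simp
    rw [hre, hlen, ih (pre ++ [c])]
    have hlast : (pre ++ [c]).getLastD '\n' = c := by simp
    rw [hlast]
    have hstep : pvStepA (pre ++ [c] ++ rest) acc ((pre.length : Int), c)
        = acc ++ (if c = '|' ∧ pre.getLastD '\n' ∈ "CT.".toList ∧ rest.headD '\n' ∈ "CT.".toList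
                  then [c, '\u0336'] else [c]) := by
      simp only [pvStepA]
      by_cases hp : pre = []
      · subst hp
        rw [if_neg (by simp), if_neg (by simp)]
      by_cases hr : rest = []
      · subst hr
        rw [if_neg (by simp), if_neg (by simp)]
      · -- interior position: both neighbours are real characters
        have hprev : PySem.List.pyGet? (pre ++ [c] ++ rest) ((pre.length : Int) - 1)
            = some (pre.getLastD '\n') := by
          rw [show ((pre.length : Int) - 1) = (((pre.length - 1 : Nat)) : Int) by
                have := List.length_pos_iff.mpr hp; omega,
              PySem.List.pyGet?_natCast]
          obtain ⟨p', pc, hpe⟩ : ∃ p' pc, pre = p' ++ [pc] :=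
            ⟨pre.dropLast, pre.getLast hp, (List.dropLast_concat_getLast hp).symm⟩
          subst hpe
          simp
        have hnxt : PySem.List.pyGet? (pre ++ [c] ++ rest) ((pre.length : Int) + 1)
            = some (rest.headD '\n') := by
          rw [show ((pre.length : Int) + 1) = (((pre.length + 1 : Nat)) : Int) by omega,
              PySem.List.pyGet?_natCast,
              List.getElem?_append_right (by simp)]
          obtain ⟨d, r', rfl⟩ := List.exists_cons_of_ne_nil hr
          simp
        rw [hprev, hnxt]
        simp only [Option.getD_some]
        have hguard : (((pre ++ [c] ++ rest).length : Int) - 1 > (pre.length : Int)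
            ∧ (pre.length : Int) > 0) := by
          have h1 := List.length_pos_iff.mpr hp
          have h2 := List.length_pos_iff.mpr hr
          constructor <;> simp <;> omega
        have hsub : (PySem.Set.issubset
            (PySem.Set.ofList [pre.getLastD '\n', rest.headD '\n']) "CT.".toList = true)
            ↔ (pre.getLastD '\n' ∈ "CT.".toList ∧ rest.headD '\n' ∈ "CT.".toList) := by
          rw [PySem.Set.issubset_iff]
          constructor
          · intro h
            exact ⟨h _ (by rw [PySem.Set.mem_ofList]; simp),
                   h _ (by rw [PySem.Set.mem_ofList]; simp)⟩
          · intro ⟨h1, h2⟩ x hx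
            rw [PySem.Set.mem_ofList] at hx
            simp only [List.mem_cons, List.not_mem_nil, or_false] at hx
            rcases hx with rfl | rfl <;> assumption
        by_cases h : c = '|' ∧ pre.getLastD '\n' ∈ "CT.".toList ∧ rest.headD '\n' ∈ "CT.".toList
        · rw [if_pos ⟨hguard, h.1, hsub.mpr h.2⟩, if_pos h]
          simp
        · rw [if_neg (fun hc => h ⟨hc.2.1, hsub.mp hc.2.2⟩), if_neg h]
    rw [hstep]
    simp [pvScan]

-- the reference scan splits at a newline separator
lemma pv_scan_split (l : List Char) : ∀ (p : Char) (rest : List Char),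
    pvScan p (l ++ '\n' :: rest) = pvScan p l ++ '\n' :: pvScan '\n' rest := by
  induction l with
  | nil => intro p rest; simp [pvScan]
  | cons c l' ih =>
    intro p rest
    simp only [List.cons_append, pvScan]
    rw [ih]
    have : (l' ++ '\n' :: rest).headD '\n' = l'.headD '\n' := by cases l' <;> simp
    rw [this]
    simp

lemma pv_str_join_toList (sep : String) (parts : List String) :
    (PySem.Str.join sep parts).toList = PySem.Chars.join sep.toList (parts.map String.toList) := by
  simp [PySem.Str.join]

-- A's per-line processing, joined, equals one scan of the joined text
lemma pv_main (lines : List String) :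
    PySem.Chars.join "\n".toList (lines.map (fun l => pvLineA l.toList))
      = pvScan '\n' (PySem.Chars.join "\n".toList (lines.map String.toList)) := by
  induction lines with
  | nil => simp [PySem.Chars.join, List.intercalate, pvScan]
  | cons l rest ih =>
    have hA : pvLineA l.toList = pvScan '\n' l.toList := by
      have := pv_foldA l.toList [] []
      simpa [pvLineA] using this
    cases rest with
    | nil =>
      simp only [List.map_cons, List.map_nil, PySem.Chars.join_singleton]
      exact hA
    | cons l2 rest' =>
      simp only [List.map_cons] at ih ⊢
      rw [PySem.Chars.join_cons_cons, PySem.Chars.join_cons_cons]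
      rw [show l.toList ++ "\n".toList ++ PySem.Chars.join "\n".toList (l2.toList :: rest'.map String.toList)
            = l.toList ++ '\n' :: PySem.Chars.join "\n".toList (l2.toList :: rest'.map String.toList) by simp]
      rw [pv_scan_split, ← ih, hA]
      simp

-- ===== VERDICT (by name: the statement is the Claim_ definition above) =====
theorem table2text_spec : Claim_equal_table2text := by
  intro table _
  unfold Spec_table2text table2text table2text_alt
  apply String.toList_inj.mp
  rw [PySem.List.slice_from_one]
  have htail : (PySem.Str.join "\n" table).toList.tail
      = (PySem.Str.join "\n" table).toList.drop 1 := by simp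
  rw [htail, pv_foldB, pv_str_join_toList, pv_str_join_toList]
  simp only [List.nil_append, List.map_map, Function.comp_def, String.toList_ofList]
  exact pv_main table
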